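-- pv_equiv track=rewrite | github.com/0xouzm/feedgrab | feedgrab/fetchers/twitter_thread.py | _has_thread_entries
-- ===== SOURCE A (Python) =====
-- def _has_thread_entries(new_tweets: list, existing_tweets: list) -> bool:
--     """Check if new tweets contain any entries that could be part of a thread."""
--     if not new_tweets:
--         return False
--
--     existing_ids = {t.get("id") for t in existing_tweets}
--
--     # At least one new tweet that we haven't seen
--     for t in new_tweets:
--         if t.get("id") not in existing_ids:
--             return True
--
--     return False
-- ===== SOURCE B (Python) =====
-- def _has_thread_entries(new_tweets: list, existing_tweets: list) -> bool:
--     """Check if new tweets contain any entries that could be part of a thread."""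
--     def unseen(ts):
--         if not ts:
--             return False
--         tid = ts[0].get("id")
--         if all(e.get("id") != tid for e in existing_tweets):
--             return True
--         return unseen(ts[1:])
--     return unseen(new_tweets)
-- ===== Notes on version B (the rewrite author's own statement) =====
-- stated objective: alternative
-- what changed: Drops the hash-set index entirely: B recurses over new_tweets and decides each id by a direct linear scan of existing_tweets (all(...!= tid)), i.e. brute-force nested scanning instead of building a set of existing ids and testing membership.
import Mathlib
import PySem

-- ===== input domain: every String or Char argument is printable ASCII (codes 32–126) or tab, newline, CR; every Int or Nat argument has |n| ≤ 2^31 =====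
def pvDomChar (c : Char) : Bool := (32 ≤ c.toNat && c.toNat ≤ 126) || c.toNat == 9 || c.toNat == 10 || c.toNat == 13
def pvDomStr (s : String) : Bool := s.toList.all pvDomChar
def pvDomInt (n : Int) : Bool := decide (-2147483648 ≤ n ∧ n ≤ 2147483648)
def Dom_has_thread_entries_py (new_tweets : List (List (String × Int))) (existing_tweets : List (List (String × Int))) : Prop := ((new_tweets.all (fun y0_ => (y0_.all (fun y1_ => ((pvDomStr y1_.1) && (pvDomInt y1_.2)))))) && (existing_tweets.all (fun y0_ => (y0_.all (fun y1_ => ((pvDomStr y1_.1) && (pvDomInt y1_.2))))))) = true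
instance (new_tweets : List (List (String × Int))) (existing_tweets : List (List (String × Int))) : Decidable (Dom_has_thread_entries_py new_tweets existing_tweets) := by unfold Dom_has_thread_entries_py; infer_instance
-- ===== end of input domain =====

-- B drops A's hash-set index: it recurses over new_tweets and checks each id by a
-- direct linear scan of existing_tweets (brute-force nested scan); objective: alternative.

-- shared helper: t.get("id") on an insertion-ordered association list (first match)
def pyGetId (t : List (String × Int)) : Option Int :=
  (t.find? (fun p => p.1 == "id")).map Prod.snd

-- ===== PORT A =====
def has_thread_entries_py (new_tweets : List (List (String × Int))) (existing_tweets : List (List (String × Int))) : Bool :=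
  if new_tweets = [] then false
  else
    let existing_ids : PySem.Set (Option Int) :=
      PySem.Set.ofList (existing_tweets.map (fun t => pyGetId t))
    -- 'for t in new_tweets: if … not in existing_ids: return True' — an existential scan
    new_tweets.any (fun t => !(PySem.Set.contains existing_ids (pyGetId t)))

-- ===== PORT B =====
-- 'unseen(ts)': recursion over the new-tweet list; the inner all(...) is a linear scan of existing_tweets
def pvUnseen (existing_tweets : List (List (String × Int))) : List (List (String × Int)) → Bool
  | [] => false
  | t :: rest =>
    if existing_tweets.all (fun e => pyGetId e != pyGetId t) then true
    else pvUnseen existing_tweets rest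

def has_thread_entries_py_alt (new_tweets : List (List (String × Int))) (existing_tweets : List (List (String × Int))) : Bool :=
  pvUnseen existing_tweets new_tweets

-- ===== PRECONDITION & SPEC =====
def Spec_has_thread_entries_py (new_tweets : List (List (String × Int))) (existing_tweets : List (List (String × Int))) (out : Bool) : Prop := out = has_thread_entries_py_alt new_tweets existing_tweets
instance (new_tweets : List (List (String × Int))) (existing_tweets : List (List (String × Int))) (out : Bool) : Decidable (Spec_has_thread_entries_py new_tweets existing_tweets out) := by unfold Spec_has_thread_entries_py; infer_instance

-- ===== CLAIM (what is proved, stated in full; the proofs are below) =====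
def Claim_equal_has_thread_entries_py : Prop := ∀ (new_tweets : List (List (String × Int))) (existing_tweets : List (List (String × Int))), Dom_has_thread_entries_py new_tweets existing_tweets → Spec_has_thread_entries_py new_tweets existing_tweets (has_thread_entries_py new_tweets existing_tweets)

-- ===== LEMMAS AND PROOFS =====

-- membership in the set of existing ids = equality with some scanned id
theorem contains_ofList_map (ex : List (List (String × Int))) (x : Option Int) :
    PySem.Set.contains (PySem.Set.ofList (ex.map (fun t => pyGetId t))) x
      = !(ex.all (fun e => pyGetId e != x)) := by
  rw [Bool.eq_iff_iff, PySem.Set.contains_iff, PySem.Set.mem_ofList]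
  simp only [Bool.not_eq_eq_eq_not, Bool.not_true, List.all_eq_false, List.mem_map, bne,
    Bool.not_eq_false, beq_iff_eq]

-- B's recursion is an existential scan
theorem pvUnseen_eq_any (ex l : List (List (String × Int))) :
    pvUnseen ex l = l.any (fun t => ex.all (fun e => pyGetId e != pyGetId t)) := by
  induction l with
  | nil => rfl
  | cons t rest ih =>
    simp only [pvUnseen, List.any_cons, ih]
    split_ifs with h <;> simp [h]

-- ===== VERDICT (by name: the statement is the Claim_ definition above) =====
theorem has_thread_entries_py_spec : Claim_equal_has_thread_entries_py := by
  intro new_tweets existing_tweets _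
  unfold Spec_has_thread_entries_py has_thread_entries_py has_thread_entries_py_alt
  rw [pvUnseen_eq_any]
  rcases new_tweets with _ | ⟨t, rest⟩
  · rfl
  · simp only [if_neg (List.cons_ne_nil t rest)]
    congr 1
    funext u
    rw [contains_ofList_map, Bool.not_not]
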